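-- pv_equiv track=rewrite | github.com/twainstain/SolanaArbitrageTrader | scripts/test_rpc_endpoints.py | check_url_chain_match
-- ===== SOURCE A (Python) =====
-- def check_url_chain_match(url: str, expected_chain: str) -> str | None:
--     """Check if the URL hostname matches the expected chain.
--
--     Returns an error string if there's a mismatch, None if OK.
--     """
--     url_lower = url.lower()
--     chain_lower = expected_chain.lower()
--
--     # Map chain names to expected URL substrings.
--     chain_url_hints: dict[str, list[str]] = {
--         "ethereum": ["eth-mainnet", "eth."],
--         "arbitrum": ["arb-mainnet", "arb1.arbitrum"],
--         "base": ["base-mainnet", "mainnet.base.org"],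
--         "polygon": ["polygon-mainnet", "matic", "polygon"],
--         "optimism": ["opt-mainnet", "optimism-mainnet", "mainnet.optimism"],
--         "avax": ["avax", "avalanche", "api.avax.network"],
--         "bsc": ["bsc", "binance"],
--         "fantom": ["fantom"],
--         "linea": ["linea"],
--         "scroll": ["scroll"],
--         "zksync": ["zksync"],
--         "gnosis": ["gnosis"],
--     }
--
--     hints = chain_url_hints.get(chain_lower, [])
--     if not hints:
--         return None  # No hints to check.
--
--     # Check if ANY hint matches the URL.
--     if any(hint in url_lower for hint in hints):
--         return None  # Match found.
--
--     # Check for known mismatches.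
--     for other_chain, other_hints in chain_url_hints.items():
--         if other_chain == chain_lower:
--             continue
--         if any(hint in url_lower for hint in other_hints):
--             return f"URL appears to be for {other_chain}, not {expected_chain}"
--
--     return None  # Can't determine, assume OK.
-- ===== SOURCE B (Python) =====
-- def check_url_chain_match(url: str, expected_chain: str) -> str | None:
--     """Check if the URL hostname matches the expected chain.
--
--     Returns an error string if there's a mismatch, None if OK.
--     """
--     url_lower = url.lower()
--     chain_lower = expected_chain.lower()
--
--     chain_url_hints: dict[str, list[str]] = {
--         "ethereum": ["eth-mainnet", "eth."],
--         "arbitrum": ["arb-mainnet", "arb1.arbitrum"],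
--         "base": ["base-mainnet", "mainnet.base.org"],
--         "polygon": ["polygon-mainnet", "matic", "polygon"],
--         "optimism": ["opt-mainnet", "optimism-mainnet", "mainnet.optimism"],
--         "avax": ["avax", "avalanche", "api.avax.network"],
--         "bsc": ["bsc", "binance"],
--         "fantom": ["fantom"],
--         "linea": ["linea"],
--         "scroll": ["scroll"],
--         "zksync": ["zksync"],
--         "gnosis": ["gnosis"],
--     }
--
--     if chain_lower not in chain_url_hints:
--         return None  # Unknown chain: nothing to check.
--
--     # Inverted index: a flat list of (hint, chain) pairs, in table order.
--     hint_chain_pairs = [(hint, chain)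
--                         for chain, hints in chain_url_hints.items()
--                         for hint in hints]
--
--     # Single pass over the flat pair list with two accumulators:
--     # did the expected chain's hints hit, and the first other chain that hit.
--     expected_hit = False
--     first_other = None
--     for hint, chain in hint_chain_pairs:
--         if hint in url_lower:
--             if chain == chain_lower:
--                 expected_hit = True
--             elif first_other is None:
--                 first_other = chain
--
--     if expected_hit or first_other is None:
--         return None
--     return f"URL appears to be for {first_other}, not {expected_chain}"
-- ===== Notes on version B (the rewrite author's own statement) =====
-- stated objective: alternative
-- what changed: B flattens the chain->hints table into an inverted list of (hint, chain) pairs and makes one pass over it with two accumulators (expected-hit flag, first other matching chain), replacing A's early-return control flow of an any() scan plus a skip-one loop with nested any() scans.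
import Mathlib
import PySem

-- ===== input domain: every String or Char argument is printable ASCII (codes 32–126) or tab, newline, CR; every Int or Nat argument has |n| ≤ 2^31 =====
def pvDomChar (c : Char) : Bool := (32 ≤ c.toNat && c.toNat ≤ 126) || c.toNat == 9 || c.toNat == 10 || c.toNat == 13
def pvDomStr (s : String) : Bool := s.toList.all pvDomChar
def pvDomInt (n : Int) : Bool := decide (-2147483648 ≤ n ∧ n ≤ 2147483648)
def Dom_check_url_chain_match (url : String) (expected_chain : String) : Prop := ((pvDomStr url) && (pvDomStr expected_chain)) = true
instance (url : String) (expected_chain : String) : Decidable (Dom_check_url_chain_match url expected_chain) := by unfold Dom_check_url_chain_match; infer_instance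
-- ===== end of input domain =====

-- B replaces A's early-return control flow (an `any` scan on the expected chain's hints,
-- then a skip-one loop with nested `any` scans) by a flattened inverted (hint, chain) pair
-- list traversed in one pass with two accumulators (objective: alternative).

-- ===== PORT A =====
-- the chain_url_hints dict literal (shared data, used by both ports)
def chainUrlHints : PySem.Dict String (List String) :=
  PySem.Dict.mk
    [ ("ethereum", ["eth-mainnet", "eth."])
    , ("arbitrum", ["arb-mainnet", "arb1.arbitrum"])
    , ("base", ["base-mainnet", "mainnet.base.org"])
    , ("polygon", ["polygon-mainnet", "matic", "polygon"])
    , ("optimism", ["opt-mainnet", "optimism-mainnet", "mainnet.optimism"])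
    , ("avax", ["avax", "avalanche", "api.avax.network"])
    , ("bsc", ["bsc", "binance"])
    , ("fantom", ["fantom"])
    , ("linea", ["linea"])
    , ("scroll", ["scroll"])
    , ("zksync", ["zksync"])
    , ("gnosis", ["gnosis"]) ]

-- A's final for-loop over chain_url_hints.items(): skip the expected chain, return on first hint hit
def pvScanOthers : List (String × List String) → String → String → String → Option String
  | [], _, _, _ => none
  | (other_chain, other_hints) :: rest, url_lower, chain_lower, expected_chain =>
    if other_chain == chain_lower then
      pvScanOthers rest url_lower chain_lower expected_chain
    else if other_hints.any (fun hint => PySem.Str.isIn hint url_lower) then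
      some ("URL appears to be for " ++ other_chain ++ ", not " ++ expected_chain)
    else
      pvScanOthers rest url_lower chain_lower expected_chain

def check_url_chain_match (url : String) (expected_chain : String) : Option String :=
  let url_lower := PySem.Str.lower url
  let chain_lower := PySem.Str.lower expected_chain
  let hints := chainUrlHints.getD chain_lower []
  if hints.isEmpty then none
  else if hints.any (fun hint => PySem.Str.isIn hint url_lower) then none
  else pvScanOthers chainUrlHints.items url_lower chain_lower expected_chain

-- ===== PORT B =====
-- B's loop body: one (hint, chain) pair updates the accumulator pair
-- (expected_hit, first_other)
def pvStep (url_lower chain_lower : String) (st : Bool × Option String)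
    (hc : String × String) : Bool × Option String :=
  if PySem.Str.isIn hc.1 url_lower then
    if hc.2 == chain_lower then (true, st.2)
    else if st.2 = none then (st.1, some hc.2)
    else st
  else st

def check_url_chain_match_alt (url : String) (expected_chain : String) : Option String :=
  let url_lower := PySem.Str.lower url
  let chain_lower := PySem.Str.lower expected_chain
  if !(chainUrlHints.contains chain_lower) then none
  else
    -- inverted index: flat list of (hint, chain) pairs, in table order
    let hint_chain_pairs :=
      chainUrlHints.items.flatMap (fun p => p.2.map (fun hint => (hint, p.1)))
    let st := hint_chain_pairs.foldl (pvStep url_lower chain_lower) (false, none)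
    if st.1 || st.2 = none then none
    else st.2.map (fun other => "URL appears to be for " ++ other ++ ", not " ++ expected_chain)

-- ===== PRECONDITION & SPEC =====
def Spec_check_url_chain_match (url : String) (expected_chain : String) (out : Option String) : Prop := out = check_url_chain_match_alt url expected_chain
instance (url : String) (expected_chain : String) (out : Option String) : Decidable (Spec_check_url_chain_match url expected_chain out) := by unfold Spec_check_url_chain_match; infer_instance

-- ===== CLAIM (what is proved, stated in full; the proofs are below) =====
def Claim_equal_check_url_chain_match : Prop := ∀ (url : String) (expected_chain : String), Dom_check_url_chain_match url expected_chain → Spec_check_url_chain_match url expected_chain (check_url_chain_match url expected_chain)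

-- ===== LEMMAS AND PROOFS =====

-- B's fold in closed form: the flag is `any` over pairs keyed by chain_lower,
-- the slot is the first matching pair of another chain
theorem pvFoldStep (ul cl : String) (l : List (String × String)) :
    ∀ (eh : Bool) (fo : Option String),
    l.foldl (pvStep ul cl) (eh, fo) =
      (eh || l.any (fun p => p.2 == cl && PySem.Chars.isIn p.1.toList ul.toList),
       fo.or (((l.find? (fun p => !(p.2 == cl) && PySem.Chars.isIn p.1.toList ul.toList)).map Prod.snd))) := by
  induction l with
  | nil => simp
  | cons q t ih =>
    intro eh fo
    obtain ⟨h, c⟩ := q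
    by_cases hp : PySem.Chars.isIn h.toList ul.toList = true
    · by_cases hc : (c == cl) = true
      · simp [pvStep, hp, hc, ih]
      · cases fo with
        | none => simp [pvStep, hp, hc, ih]
        | some x => simp [pvStep, hp, hc, ih]
    · simp [pvStep, hp, ih]

-- first "other chain" in the flat pair list = first "other entry with a hit" in the table
theorem pvFind_pairs (ul cl : String) (l : List (String × List String)) :
    ((l.flatMap (fun p => p.2.map (fun hint => (hint, p.1)))).find?
        (fun p => !(p.2 == cl) && PySem.Chars.isIn p.1.toList ul.toList)).map Prod.snd
      = (l.find? (fun q => !(q.1 == cl) && q.2.any (fun h => PySem.Chars.isIn h.toList ul.toList))).map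
          Prod.fst := by
  induction l with
  | nil => simp
  | cons q t ih =>
    obtain ⟨c, hs⟩ := q
    simp only [List.flatMap_cons, List.find?_append, List.find?_map]
    by_cases hc : (c == cl) = true
    · have : hs.find? ((fun p => !(p.2 == cl) && PySem.Chars.isIn p.1.toList ul.toList) ∘
          (fun hint => (hint, c))) = none := by
        apply List.find?_eq_none.mpr
        intro x _
        simp [Function.comp, hc]
      rw [this]
      rw [List.find?_cons_of_neg (by simp [hc])]
      simpa using ih
    · cases hfind : hs.find? (fun h => PySem.Chars.isIn h.toList ul.toList) with
      | some h0 =>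
        have hc' : (c == cl) = false := by simpa using hc
        have heqp : ((fun p : String × String => !(p.2 == cl) && PySem.Chars.isIn p.1.toList ul.toList) ∘
            (fun hint => (hint, c))) = fun h => PySem.Chars.isIn h.toList ul.toList := by
          funext h
          simp [Function.comp, hc']
        rw [heqp, hfind]
        have hp0 : PySem.Chars.isIn h0.toList ul.toList = true :=
          (List.find?_eq_some_iff_append.mp hfind).1
        have hany : hs.any (fun h => PySem.Chars.isIn h.toList ul.toList) = true :=
          List.any_eq_true.mpr ⟨h0, List.mem_of_find?_eq_some hfind, hp0⟩
        rw [List.find?_cons_of_pos (by simp [hc, hany])]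
        simp
      | none =>
        have : hs.find? ((fun p : String × String => !(p.2 == cl) && PySem.Chars.isIn p.1.toList ul.toList) ∘
            (fun hint => (hint, c))) = none := by
          apply List.find?_eq_none.mpr
          intro x hx
          have := List.find?_eq_none.mp hfind x hx
          simp_all [Function.comp]
        rw [this]
        have hany : hs.any (fun h => PySem.Chars.isIn h.toList ul.toList) = false := by
          simp only [Bool.eq_false_iff, ne_eq, List.any_eq_true, not_exists, not_and]
          intro x hx
          simpa using List.find?_eq_none.mp hfind x hx
        rw [List.find?_cons_of_neg (by simp [hany])]
        simpa using ih

-- the flag of B's fold, for the table: true iff the expected chain's own hints hit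
theorem pvAny_pairs (ul cl : String) (hs : List String)
    (hget : chainUrlHints.get? cl = some hs) :
    (chainUrlHints.items.flatMap (fun p => p.2.map (fun hint => (hint, p.1)))).any
        (fun p => p.2 == cl && PySem.Chars.isIn p.1.toList ul.toList)
      = hs.any (fun h => PySem.Chars.isIn h.toList ul.toList) := by
  have hnd : chainUrlHints.keys.Nodup := by decide
  cases hcase : hs.any (fun h => PySem.Chars.isIn h.toList ul.toList) with
  | true =>
    rcases List.any_eq_true.mp hcase with ⟨h0, hmem, hp0⟩
    apply List.any_eq_true.mpr
    refine ⟨(h0, cl), ?_, by simp [hp0]⟩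
    exact List.mem_flatMap.mpr ⟨(cl, hs), PySem.Dict.mem_items_of_get?_eq_some _ hget,
      List.mem_map.mpr ⟨h0, hmem, rfl⟩⟩
  | false =>
    simp only [Bool.eq_false_iff, ne_eq, List.any_eq_true, not_exists, not_and]
    rintro ⟨h0, c0⟩ hmem hp
    rcases List.mem_flatMap.mp hmem with ⟨⟨c1, hs1⟩, hm1, hm2⟩
    rcases List.mem_map.mp hm2 with ⟨h1, hh1, heq⟩
    cases heq
    simp only [Bool.and_eq_true, beq_iff_eq] at hp
    obtain ⟨rfl, hp2⟩ := hp
    have hg := PySem.Dict.get?_of_mem_items (d := chainUrlHints) hm1 hnd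
    rw [hget] at hg
    cases hg
    have : hs.any (fun h => PySem.Chars.isIn h.toList ul.toList) = true :=
      List.any_eq_true.mpr ⟨_, hh1, hp2⟩
    rw [hcase] at this
    exact Bool.false_ne_true this

-- A's skip-one scan is the first table entry with another key and a hint hit
theorem pvScanOthers_eq_find? (ul cl ec : String) (l : List (String × List String)) :
    pvScanOthers l ul cl ec =
      (l.find? (fun q => !(q.1 == cl) && q.2.any (fun h => PySem.Chars.isIn h.toList ul.toList))).map
        (fun q => "URL appears to be for " ++ q.1 ++ ", not " ++ ec) := by
  induction l with
  | nil => simp [pvScanOthers]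
  | cons q rest ih =>
    obtain ⟨c, hs⟩ := q
    by_cases hc : (c == cl) = true
    · rw [List.find?_cons_of_neg (by simp [hc])]
      simp only [pvScanOthers, hc, if_true]
      exact ih
    · cases hp : (hs.any fun h => PySem.Chars.isIn h.toList ul.toList) with
      | true =>
        rw [List.find?_cons_of_pos (by simp [hc, hp])]
        simp only [pvScanOthers, hc, PySem.Str.isIn_eq, hp, if_true]
        rfl
      | false =>
        rw [List.find?_cons_of_neg (by simp [hc, hp])]
        simp only [pvScanOthers, hc, PySem.Str.isIn_eq, hp]
        simpa using ih

-- the concrete table has no empty hint list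
theorem chainUrlHints_ne_nil (cl : String) (hs : List String)
    (hmem : (cl, hs) ∈ chainUrlHints.items) : hs ≠ [] := by
  have hv : hs ∈ chainUrlHints.items.map Prod.snd := List.mem_map_of_mem hmem
  simp only [chainUrlHints] at hv
  simp only [List.map_cons, List.map_nil, List.mem_cons, List.not_mem_nil, or_false] at hv
  rcases hv with rfl|rfl|rfl|rfl|rfl|rfl|rfl|rfl|rfl|rfl|rfl|rfl <;> simp

-- ===== VERDICT (by name: the statement is the Claim_ definition above) =====
theorem check_url_chain_match_spec : Claim_equal_check_url_chain_match := by
  intro url expected_chain _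
  unfold Spec_check_url_chain_match check_url_chain_match check_url_chain_match_alt
  dsimp only
  simp only [PySem.Str.isIn_eq]
  set ul := PySem.Str.lower url with hul
  set cl := PySem.Str.lower expected_chain with hcl
  rw [pvFoldStep ul cl _ false none]
  cases hget : chainUrlHints.get? cl with
  | none =>
    have hc : chainUrlHints.contains cl = false := by
      rw [PySem.Dict.contains_eq_isSome_get?, hget]; rfl
    rw [PySem.Dict.getD_eq_get?_getD, hget]
    simp [hc]
  | some hs =>
    have hc : chainUrlHints.contains cl = true := by
      rw [PySem.Dict.contains_eq_isSome_get?, hget]; rfl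
    have hmem : (cl, hs) ∈ chainUrlHints.items :=
      PySem.Dict.mem_items_of_get?_eq_some _ hget
    have hne : hs ≠ [] := chainUrlHints_ne_nil cl hs hmem
    have hE : hs.isEmpty = false := by simpa [List.isEmpty_iff] using hne
    rw [PySem.Dict.getD_eq_get?_getD, hget]
    simp only [Option.getD_some, hc, Bool.not_true, Bool.false_eq_true, if_false, hE]
    rw [pvAny_pairs ul cl hs hget, pvFind_pairs ul cl]
    by_cases hany : (hs.any fun h => PySem.Chars.isIn h.toList ul.toList) = true
    · simp [hany]
    · simp only [Bool.not_eq_true] at hany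
      rw [if_neg (by simp [hany]), hany]
      rw [pvScanOthers_eq_find? ul cl expected_chain]
      cases hfind : chainUrlHints.items.find?
          (fun q => !(q.1 == cl) && q.2.any (fun h => PySem.Chars.isIn h.toList ul.toList)) with
      | none => simp
      | some q => simp
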